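-- pv_equiv track=rewrite | github.com/jaiwanthi2004/Workflow-Enginee | backend/app/engine/rule_engine.py | _split_comparison
-- ===== SOURCE A (Python) =====
-- from typing import Any, Optional
--
-- def _split_comparison(expr: str, op: str) -> Optional[tuple]:
--     """Split expression by a comparison operator, respecting quotes."""
--     in_string = None
--     i = 0
--     while i < len(expr):
--         ch = expr[i]
--         if ch in ('"', "'") and (i == 0 or expr[i - 1] != "\\"):
--             if in_string is None:
--                 in_string = ch
--             elif in_string == ch:
--                 in_string = None
--         if in_string is None and expr[i : i + len(op)] == op:
--             # Make sure we don't match partial operators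
--             if op in (">", "<") and i + 1 < len(expr) and expr[i + 1] == "=":
--                 i += 1
--                 continue
--             if op in (">", "<") and i > 0 and expr[i - 1] in ("!", "<", ">"):
--                 i += 1
--                 continue
--             return (expr[:i], expr[i + len(op) :])
--         i += 1
--     return None
-- ===== SOURCE B (Python) =====
-- from typing import Optional
--
--
-- def _string_spans(expr: str) -> list:
--     """Half-open intervals [a, b) of indices lying strictly inside a string
--     literal (the closing quote itself is already outside)."""
--     spans = []
--     i = 0
--     n = len(expr)
--     while i < n:
--         ch = expr[i]
--         if ch in ('"', "'") and (i == 0 or expr[i - 1] != "\\"):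
--             j = i + 1
--             while j < n and not (expr[j] == ch and expr[j - 1] != "\\"):
--                 j += 1
--             spans.append((i, j))
--             i = j + 1
--         else:
--             i += 1
--     return spans
--
--
-- def _split_comparison(expr: str, op: str) -> Optional[tuple]:
--     """Split expression by a comparison operator, respecting quotes."""
--     spans = _string_spans(expr)
--     guarded = op in (">", "<")
--     pos = 0
--     while True:
--         i = expr.find(op, pos)
--         if i == -1 or i >= len(expr):
--             return None
--         if (not any(a <= i < b for a, b in spans)
--                 and not (guarded and i + 1 < len(expr) and expr[i + 1] == "=")
--                 and not (guarded and i > 0 and expr[i - 1] in ("!", "<", ">"))):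
--             return (expr[:i], expr[i + len(op):])
--         pos = i + 1
-- ===== Notes on version B (the rewrite author's own statement) =====
-- stated objective: faster
-- what changed: A interleaves quote tracking with operator matching in one per-character while-loop; B instead extracts the string-literal intervals with a dedicated skip-to-closing-quote loop, then iterates only over the operator's occurrences located with str.find, rejecting those inside an extracted interval or failing the boundary guards.
import Mathlib
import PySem

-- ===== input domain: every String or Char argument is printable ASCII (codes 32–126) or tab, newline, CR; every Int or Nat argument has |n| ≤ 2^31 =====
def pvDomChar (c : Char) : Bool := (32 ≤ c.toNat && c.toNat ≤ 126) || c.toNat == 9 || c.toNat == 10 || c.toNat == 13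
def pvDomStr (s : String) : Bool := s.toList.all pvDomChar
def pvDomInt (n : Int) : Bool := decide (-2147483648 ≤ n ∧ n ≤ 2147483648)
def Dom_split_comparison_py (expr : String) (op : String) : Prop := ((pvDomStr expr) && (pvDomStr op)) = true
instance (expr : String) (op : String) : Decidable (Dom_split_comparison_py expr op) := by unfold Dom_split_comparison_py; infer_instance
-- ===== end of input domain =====

-- B replaces A's per-character quote-state scan by a different decomposition: a skip-loop pass that
-- extracts the string-literal intervals wholesale, then a str.find-driven loop over the operator's
-- occurrences only, checked against those intervals; same asymptotic cost, measurably faster constants (str.find scans between occurrences at C level).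


-- ===== PORT A =====
-- literal port of A's while-loop: state = (in_string, i); quote toggle, then match + guards,
-- `continue` = tail call with i+1.  Slices expr[i:i+len op] → (drop i).take, clamping like Python.
-- the quote toggle performed on char expr[i] (A's first `if`, updating in_string)
def toggleA (expr : List Char) (i : Nat) (inStr : Option Char) : Option Char :=
  if (expr[i]! = '"' ∨ expr[i]! = '\'') ∧ (i = 0 ∨ expr[i - 1]! ≠ '\\') then
    if inStr = none then some expr[i]!
    else if inStr = some expr[i]! then none
    else inStr
  else inStr

def splitA_loop (expr op : List Char) (inStr : Option Char) (i : Nat) :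
    Option (String × String) :=
  if h : i < expr.length then
    if toggleA expr i inStr = none ∧ (expr.drop i).take op.length = op then
      if (op = ['>'] ∨ op = ['<']) ∧ (i + 1 < expr.length ∧ expr[i + 1]! = '=') then
        splitA_loop expr op (toggleA expr i inStr) (i + 1)
      else if (op = ['>'] ∨ op = ['<']) ∧
          (0 < i ∧ (expr[i - 1]! = '!' ∨ expr[i - 1]! = '<' ∨ expr[i - 1]! = '>')) then
        splitA_loop expr op (toggleA expr i inStr) (i + 1)
      else some (String.ofList (expr.take i), String.ofList (expr.drop (i + op.length)))
    else splitA_loop expr op (toggleA expr i inStr) (i + 1)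
  else none
  termination_by expr.length - i

def split_comparison_py (expr : String) (op : String) : Option (String × String) :=
  splitA_loop expr.toList op.toList none 0

-- ===== PORT B =====
-- Source B's inner skip loop of _string_spans: first j ≥ start holding an unescaped closing quote ch,
-- or len(expr) if the literal is unterminated
def skipClose (expr : List Char) (ch : Char) (j : Nat) : Nat :=
  if _h : j < expr.length then
    if expr[j]! = ch ∧ expr[j - 1]! ≠ '\\' then j
    else skipClose expr ch (j + 1)
  else expr.length
  termination_by expr.length - j

-- needed by buildSpans's termination proof
lemma skipClose_ge (expr : List Char) (ch : Char) :
    ∀ j, j ≤ expr.length → j ≤ skipClose expr ch j := by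
  intro j
  induction hn : expr.length - j using Nat.strong_induction_on generalizing j with
  | _ n ih =>
    intro hle
    unfold skipClose
    split
    · split
      · exact Nat.le_refl j
      · have h2 := ih (expr.length - (j + 1)) (by omega) (j + 1) rfl (by omega)
        omega
    · omega

-- Source B's _string_spans outer loop: half-open intervals [a, b) strictly inside string literals
def buildSpans (expr : List Char) (i : Nat) : List (Nat × Nat) :=
  if h : i < expr.length then
    if (expr[i]! = '"' ∨ expr[i]! = '\'') ∧ (i = 0 ∨ expr[i - 1]! ≠ '\\') then
      (i, skipClose expr expr[i]! (i + 1)) ::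
        buildSpans expr (skipClose expr expr[i]! (i + 1) + 1)
    else buildSpans expr (i + 1)
  else []
  termination_by expr.length - i
  decreasing_by
    · have := skipClose_ge expr expr[i]! (i + 1) (by omega); omega
    · omega

-- Python's expr.find(op, pos): first index ≥ pos where op occurs (none = -1)
def findFrom (expr op : List Char) (pos : Nat) : Option Nat :=
  if pos + op.length ≤ expr.length then
    if (expr.drop pos).take op.length = op then some pos
    else findFrom expr op (pos + 1)
  else none
  termination_by expr.length + 1 - pos

-- needed by loopB's termination proof
lemma findFrom_bounds (expr op : List Char) :
    ∀ pos i, findFrom expr op pos = some i → pos ≤ i ∧ i + op.length ≤ expr.length := by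
  intro pos
  induction hn : expr.length + 1 - pos using Nat.strong_induction_on generalizing pos with
  | _ n ih =>
    intro i hf
    rw [findFrom] at hf
    split at hf
    · split at hf
      · cases hf; omega
      · have := ih (expr.length + 1 - (pos + 1)) (by omega) (pos + 1) rfl i hf
        omega
    · exact absurd hf (by simp)

-- Source B's `any(a <= i < b for a, b in spans)`
def inSpan (spans : List (Nat × Nat)) (i : Nat) : Bool :=
  spans.any (fun p => decide (p.1 ≤ i) && decide (i < p.2))

-- Source B's main while-loop over find() occurrences
def loopB (expr op : List Char) (spans : List (Nat × Nat)) (pos : Nat) :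
    Option (String × String) :=
  match hf : findFrom expr op pos with
  | none => none
  | some i =>
    if expr.length ≤ i then none
    else if inSpan spans i = false
        ∧ ¬ ((op = ['>'] ∨ op = ['<']) ∧ (i + 1 < expr.length ∧ expr[i + 1]! = '='))
        ∧ ¬ ((op = ['>'] ∨ op = ['<']) ∧
            (0 < i ∧ (expr[i - 1]! = '!' ∨ expr[i - 1]! = '<' ∨ expr[i - 1]! = '>'))) then
      some (String.ofList (expr.take i), String.ofList (expr.drop (i + op.length)))
    else loopB expr op spans (i + 1)
  termination_by expr.length + 1 - pos
  decreasing_by have := findFrom_bounds expr op pos i hf; omega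

def split_comparison_py_alt (expr : String) (op : String) : Option (String × String) :=
  loopB expr.toList op.toList (buildSpans expr.toList 0) 0

-- ===== PRECONDITION & SPEC =====
def Spec_split_comparison_py (expr : String) (op : String) (out : Option (String × String)) : Prop := out = split_comparison_py_alt expr op
instance (expr : String) (op : String) (out : Option (String × String)) : Decidable (Spec_split_comparison_py expr op out) := by unfold Spec_split_comparison_py; infer_instance

-- ===== CLAIM (what is proved, stated in full; the proofs are below) =====
def Claim_equal_split_comparison_py : Prop := ∀ (expr : String) (op : String), Dom_split_comparison_py expr op → Spec_split_comparison_py expr op (split_comparison_py expr op)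

-- ===== LEMMAS AND PROOFS =====

-- quote state at the START of A's iteration i (a function of the prefix only)
def stateAt (expr : List Char) : Nat → Option Char
  | 0 => none
  | i + 1 => toggleA expr i (stateAt expr i)

lemma stateAt_succ (expr : List Char) (i : Nat) :
    stateAt expr (i + 1) = toggleA expr i (stateAt expr i) := rfl

lemma skipClose_le (expr : List Char) (ch : Char) : ∀ j, skipClose expr ch j ≤ expr.length := by
  intro j
  induction hn : expr.length - j using Nat.strong_induction_on generalizing j with
  | _ n ih =>
    unfold skipClose
    split
    · split
      · omega
      · exact ih (expr.length - (j + 1)) (by omega) (j + 1) rfl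
    · omega

lemma skipClose_not_before (expr : List Char) (ch : Char) :
    ∀ j k, j ≤ k → k < skipClose expr ch j → ¬ (expr[k]! = ch ∧ expr[k - 1]! ≠ '\\') := by
  intro j
  induction hn : expr.length - j using Nat.strong_induction_on generalizing j with
  | _ n ih =>
    intro k hjk hk
    rw [skipClose] at hk
    split at hk
    · split at hk
      · omega
      · rcases Nat.eq_or_lt_of_le hjk with h | h
        · subst h; assumption
        · exact ih (expr.length - (j + 1)) (by omega) (j + 1) rfl k h hk
    · have := skipClose_le expr ch j
      omega

lemma skipClose_found (expr : List Char) (ch : Char) :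
    ∀ j, skipClose expr ch j < expr.length →
      expr[skipClose expr ch j]! = ch ∧ expr[skipClose expr ch j - 1]! ≠ '\\' := by
  intro j
  induction hn : expr.length - j using Nat.strong_induction_on generalizing j with
  | _ n ih =>
    intro hlt
    by_cases hj : j < expr.length
    · by_cases hc : expr[j]! = ch ∧ expr[j - 1]! ≠ '\\'
      · rw [skipClose, dif_pos hj, if_pos hc]
        exact hc
      · rw [skipClose, dif_pos hj, if_neg hc] at hlt ⊢
        exact ih (expr.length - (j + 1)) (by omega) (j + 1) rfl hlt
    · rw [skipClose, dif_neg hj] at hlt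
      omega

lemma spans_lb (expr : List Char) : ∀ s p, p ∈ buildSpans expr s → s ≤ p.1 := by
  intro s
  induction hn : expr.length - s using Nat.strong_induction_on generalizing s with
  | _ n ih =>
    intro p hp
    rw [buildSpans] at hp
    split at hp
    · split at hp
      · rcases List.mem_cons.mp hp with h | h
        · subst h; exact Nat.le_refl s
        · have hge := skipClose_ge expr expr[s]! (s + 1) (by omega)
          have := ih (expr.length - (skipClose expr expr[s]! (s + 1) + 1)) (by omega)
            (skipClose expr expr[s]! (s + 1) + 1) rfl p h
          omega
      · have := ih (expr.length - (s + 1)) (by omega) (s + 1) rfl p hp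
        omega
    · simp at hp

lemma inSpan_before (expr : List Char) (s i : Nat) (h : i < s) :
    inSpan (buildSpans expr s) i = false := by
  unfold inSpan
  rw [List.any_eq_false]
  intro p hp
  have := spans_lb expr s p hp
  simp only [Bool.and_eq_true, decide_eq_true_eq, not_and]
  omega

lemma skip_state (expr : List Char) (s : Nat) (_hs : s < expr.length)
    (hq : (expr[s]! = '"' ∨ expr[s]! = '\'') ∧ (s = 0 ∨ expr[s - 1]! ≠ '\\'))
    (hst : stateAt expr s = none) :
    ∀ k, s + 1 ≤ k → k ≤ skipClose expr expr[s]! (s + 1) →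
      stateAt expr k = some expr[s]! := by
  intro k hk
  induction k, hk using Nat.le_induction with
  | base =>
    intro _
    rw [stateAt_succ, toggleA, if_pos hq, hst]
    simp
  | succ k hk ih =>
    intro hkj
    have hstk : stateAt expr k = some expr[s]! := ih (by omega)
    have hkltj : k < skipClose expr expr[s]! (s + 1) := by omega
    have hnb := skipClose_not_before expr expr[s]! (s + 1) k hk hkltj
    rw [stateAt_succ, hstk, toggleA]
    split
    · rename_i hcond
      have hne : expr[k]! ≠ expr[s]! := by
        intro he
        apply hnb
        refine ⟨he, ?_⟩
        rcases hcond.2 with h0 | h0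
        · omega
        · exact h0
      have h1 : ¬ (some expr[s]! = (none : Option Char)) := by simp
      have h2 : ¬ (some expr[s]! = some expr[k]!) := by
        intro h
        exact hne (Option.some_inj.mp h).symm
      rw [if_neg h1, if_neg h2]
    · rfl

lemma spanChar (expr : List Char) : ∀ s, stateAt expr s = none →
    ∀ i, s ≤ i → i < expr.length →
      (inSpan (buildSpans expr s) i = true ↔ stateAt expr (i + 1) ≠ none) := by
  intro s
  induction hn : expr.length - s using Nat.strong_induction_on generalizing s with
  | _ n ih =>
    intro hst i hsi hilt
    have hs : s < expr.length := by omega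
    rw [buildSpans, dif_pos hs]
    by_cases hq : (expr[s]! = '"' ∨ expr[s]! = '\'') ∧ (s = 0 ∨ expr[s - 1]! ≠ '\\')
    · rw [if_pos hq]
      obtain ⟨j, hj⟩ : ∃ j, j = skipClose expr expr[s]! (s + 1) := ⟨_, rfl⟩
      rw [← hj]
      have hjge : s + 1 ≤ j := hj ▸ skipClose_ge expr expr[s]! (s + 1) (by omega)
      have hjle : j ≤ expr.length := hj ▸ skipClose_le expr expr[s]! (s + 1)
      have hstate := skip_state expr s hs hq hst
      rw [← hj] at hstate
      rcases Nat.lt_trichotomy i j with hlt | heq | hgt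
      · -- inside the literal
        have : stateAt expr (i + 1) = some expr[s]! := hstate (i + 1) (by omega) (by omega)
        simp [inSpan, this, hsi, hlt]
      · -- the closing quote itself: state after it is none, and it is outside all spans
        subst heq
        have hfound := skipClose_found expr expr[s]! (s + 1)
        rw [← hj] at hfound
        have hfnd := hfound hilt
        have hstj : stateAt expr i = some expr[s]! := hstate i (by omega) (by omega)
        have hnone : stateAt expr (i + 1) = none := by
          rw [stateAt_succ, hstj, toggleA, if_pos]
          · simp [hfnd.1]
          · exact ⟨by rw [hfnd.1]; exact hq.1, Or.inr hfnd.2⟩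
        have hrest : inSpan (buildSpans expr (i + 1)) i = false :=
          inSpan_before expr (i + 1) i (by omega)
        simp only [inSpan, List.any_cons] at hrest ⊢
        simp [hnone, hrest]
      · -- past the literal
        have hjltlen : j < expr.length := by omega
        have hfound := skipClose_found expr expr[s]! (s + 1)
        rw [← hj] at hfound
        have hfnd := hfound hjltlen
        have hstj : stateAt expr j = some expr[s]! := hstate j (by omega) (by omega)
        have hstj1 : stateAt expr (j + 1) = none := by
          rw [stateAt_succ, hstj, toggleA, if_pos]
          · simp [hfnd.1]
          · exact ⟨by rw [hfnd.1]; exact hq.1, Or.inr hfnd.2⟩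
        have hih := ih (expr.length - (j + 1)) (by omega) (j + 1) rfl hstj1 i (by omega) hilt
        simp only [inSpan, List.any_cons] at hih ⊢
        have hnotlt : ¬ i < j := by omega
        simp [hnotlt, hih]
    · rw [if_neg hq]
      have hst1 : stateAt expr (s + 1) = none := by
        rw [stateAt_succ, toggleA, if_neg hq]; exact hst
      rcases Nat.eq_or_lt_of_le hsi with h | h
      · subst h
        have hrest : inSpan (buildSpans expr (s + 1)) s = false :=
          inSpan_before expr (s + 1) s (by omega)
        simp [hrest, hst1]
      · exact ih (expr.length - (s + 1)) (by omega) (s + 1) rfl hst1 i h hilt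

lemma match_len (expr op : List Char) (i : Nat) (hm : (expr.drop i).take op.length = op) :
    i + op.length ≤ expr.length ∨ op.length = 0 := by
  have := congrArg List.length hm
  simp [List.length_take, List.length_drop] at this
  omega

lemma Anone (expr op : List Char) :
    ∀ j st, expr.length < j + op.length → splitA_loop expr op st j = none := by
  intro j
  induction hn : expr.length - j using Nat.strong_induction_on generalizing j with
  | _ n ih =>
    intro st hbig
    rw [splitA_loop]
    split
    · rename_i hj
      have hnm : ¬ (expr.drop j).take op.length = op := by
        intro hm
        rcases match_len expr op j hm with h | h <;> omega
      rw [if_neg (by intro h; exact hnm h.2)]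
      exact ih (expr.length - (j + 1)) (by omega) (j + 1) rfl _ (by omega)
    · rfl

lemma findFrom_none (expr op : List Char) (pos : Nat) (h : ¬ pos + op.length ≤ expr.length) :
    findFrom expr op pos = none := by
  rw [findFrom, if_neg h]

lemma findFrom_hit (expr op : List Char) (pos : Nat) (h : pos + op.length ≤ expr.length)
    (hm : (expr.drop pos).take op.length = op) : findFrom expr op pos = some pos := by
  rw [findFrom, if_pos h, if_pos hm]

lemma findFrom_step (expr op : List Char) (pos : Nat) (h : pos + op.length ≤ expr.length)
    (hm : ¬ (expr.drop pos).take op.length = op) :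
    findFrom expr op pos = findFrom expr op (pos + 1) := by
  rw [findFrom, if_pos h, if_neg hm]

lemma loopB_none (expr op : List Char) (spans : List (Nat × Nat)) (pos : Nat)
    (h : findFrom expr op pos = none) : loopB expr op spans pos = none := by
  rw [loopB, h]

lemma loopB_some (expr op : List Char) (spans : List (Nat × Nat)) (pos i : Nat)
    (h : findFrom expr op pos = some i) :
    loopB expr op spans pos =
      (if expr.length ≤ i then none
       else if inSpan spans i = false
          ∧ ¬ ((op = ['>'] ∨ op = ['<']) ∧ (i + 1 < expr.length ∧ expr[i + 1]! = '='))
          ∧ ¬ ((op = ['>'] ∨ op = ['<']) ∧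
              (0 < i ∧ (expr[i - 1]! = '!' ∨ expr[i - 1]! = '<' ∨ expr[i - 1]! = '>'))) then
        some (String.ofList (expr.take i), String.ofList (expr.drop (i + op.length)))
       else loopB expr op spans (i + 1)) := by
  rw [loopB, h]

-- loopB only depends on pos through findFrom
lemma loopB_congr (expr op : List Char) (spans : List (Nat × Nat)) (pos pos' : Nat)
    (h : findFrom expr op pos = findFrom expr op pos') :
    loopB expr op spans pos = loopB expr op spans pos' := by
  cases h' : findFrom expr op pos' with
  | none => rw [loopB_none expr op spans pos (h.trans h'), loopB_none expr op spans pos' h']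
  | some i => rw [loopB_some expr op spans pos i (h.trans h'), loopB_some expr op spans pos' i h']

lemma mainLoop (expr op : List Char) :
    ∀ i, splitA_loop expr op (stateAt expr i) i = loopB expr op (buildSpans expr 0) i := by
  intro i
  induction hn : expr.length + 1 - i using Nat.strong_induction_on generalizing i with
  | _ n ih =>
    by_cases hlt : i < expr.length
    · by_cases hm : (expr.drop i).take op.length = op
      · have hle : i + op.length ≤ expr.length := by
          rcases match_len expr op i hm with h | h <;> omega
        have hf := findFrom_hit expr op i hle hm
        rw [loopB_some expr op _ i i hf]
        rw [if_neg (by omega)]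
        have hspan := spanChar expr 0 rfl i (Nat.zero_le i) hlt
        rw [splitA_loop, dif_pos hlt]
        rw [show toggleA expr i (stateAt expr i) = stateAt expr (i + 1) from rfl]
        have hrec := ih (expr.length + 1 - (i + 1)) (by omega) (i + 1) rfl
        cases hstate : stateAt expr (i + 1) with
        | some c =>
          rw [hstate] at hrec
          have hsp : inSpan (buildSpans expr 0) i = true := hspan.mpr (by simp [hstate])
          rw [if_neg (by simp)]
          rw [if_neg (by simp [hsp])]
          exact hrec
        | none =>
          rw [hstate] at hrec
          have hsp : inSpan (buildSpans expr 0) i = false := by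
            cases hx : inSpan (buildSpans expr 0) i
            · rfl
            · exact absurd (hspan.mp hx) (by simp [hstate])
          rw [if_pos ⟨rfl, hm⟩]
          by_cases hg1 : (op = ['>'] ∨ op = ['<']) ∧ (i + 1 < expr.length ∧ expr[i + 1]! = '=')
          · rw [if_pos hg1, if_neg (by intro h; exact h.2.1 hg1)]
            exact hrec
          · rw [if_neg hg1]
            by_cases hg2 : (op = ['>'] ∨ op = ['<']) ∧
                (0 < i ∧ (expr[i - 1]! = '!' ∨ expr[i - 1]! = '<' ∨ expr[i - 1]! = '>'))
            · rw [if_pos hg2, if_neg (by intro h; exact h.2.2 hg2)]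
              exact hrec
            · rw [if_neg hg2, if_pos ⟨hsp, hg1, hg2⟩]
      · by_cases hle : i + op.length ≤ expr.length
        · have hstep := findFrom_step expr op i hle hm
          rw [splitA_loop, dif_pos hlt, if_neg (by intro h; exact hm h.2)]
          rw [show toggleA expr i (stateAt expr i) = stateAt expr (i + 1) from rfl]
          rw [ih (expr.length + 1 - (i + 1)) (by omega) (i + 1) rfl]
          exact loopB_congr expr op _ (i + 1) i hstep.symm
        · have hf := findFrom_none expr op i hle
          rw [loopB_none expr op _ i hf]
          rw [splitA_loop, dif_pos hlt, if_neg (by intro h; exact hm h.2)]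
          exact Anone expr op (i + 1) _ (by omega)
    · rw [splitA_loop, dif_neg hlt]
      cases hf : findFrom expr op i with
      | none => rw [loopB_none expr op _ i hf]
      | some i' =>
        have := findFrom_bounds expr op i i' hf
        rw [loopB_some expr op _ i i' hf, if_pos (by omega)]

-- ===== VERDICT (by name: the statement is the Claim_ definition above) =====
theorem split_comparison_py_spec : Claim_equal_split_comparison_py := by
  intro expr op _
  unfold Spec_split_comparison_py split_comparison_py split_comparison_py_alt
  exact mainLoop expr.toList op.toList 0
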